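-- pv_equiv track=rewrite | github.com/tynnp/Practice | Other/LTCB2018.Cau7.py | check
-- ===== SOURCE A (Python) =====
-- def check(soKyDieu):
--     chuSo = [int(chu) for chu in str(soKyDieu)]
--     chuSoTangDan = sorted(chuSo)
--     chuSoGiamDan = sorted(chuSo, reverse=True)
--     soNhoNhat = int("".join(map(str, chuSoTangDan)))
--     soLonNhat = int("".join(map(str, chuSoGiamDan)))
--     hieu = soLonNhat - soNhoNhat
--
--     if hieu == soKyDieu:
--         return "YES", soLonNhat, soNhoNhat
--     else:
--         return "NO", soLonNhat, soNhoNhat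
-- ===== SOURCE B (Python) =====
-- def check(soKyDieu):
--     count = {}
--     for chu in str(soKyDieu):
--         d = int(chu)
--         count[d] = count.get(d, 0) + 1
--     soNhoNhat = int("".join(str(d) * count.get(d, 0) for d in range(10)))
--     soLonNhat = int("".join(str(d) * count.get(d, 0) for d in range(9, -1, -1)))
--     if soLonNhat - soNhoNhat == soKyDieu:
--         return "YES", soLonNhat, soNhoNhat
--     else:
--         return "NO", soLonNhat, soNhoNhat
-- ===== Notes on version B (the rewrite author's own statement) =====
-- stated objective: alternative
-- what changed: B replaces both sorted() calls by a one-pass digit frequency table and builds the smallest/largest rearrangements by walking the buckets 0..9 ascending and 9..0 descending (counting sort).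
import Mathlib
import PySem

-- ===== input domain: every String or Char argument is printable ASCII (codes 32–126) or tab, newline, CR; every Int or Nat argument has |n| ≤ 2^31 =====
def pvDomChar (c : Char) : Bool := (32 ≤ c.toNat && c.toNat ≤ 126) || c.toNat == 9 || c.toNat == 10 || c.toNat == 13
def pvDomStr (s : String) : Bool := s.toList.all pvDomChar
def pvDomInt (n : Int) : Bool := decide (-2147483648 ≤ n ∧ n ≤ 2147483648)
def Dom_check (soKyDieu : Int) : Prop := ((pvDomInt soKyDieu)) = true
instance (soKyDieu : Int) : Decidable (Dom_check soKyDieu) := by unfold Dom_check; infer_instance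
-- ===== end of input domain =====

-- B replaces the two sorted() calls by a one-pass digit frequency table walked 0..9 and 9..0 (counting sort); same result.

-- ===== PORT A =====
-- int(chu) for a single character chu; none (ValueError, e.g. on '-') is excluded by Pre_check
def pyDigit (chu : Char) : Int := (PySem.Int.ofChars? [chu]).getD 0

def check (soKyDieu : Int) : String × Int × Int :=
  let chuSo := (PySem.Int.toChars soKyDieu).map pyDigit
  let chuSoTangDan := PySem.List.sorted chuSo (fun x => x) false
  let chuSoGiamDan := PySem.List.sorted chuSo (fun x => x) true
  let soNhoNhat := (PySem.Int.ofChars? (chuSoTangDan.flatMap PySem.Int.toChars)).getD 0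
  let soLonNhat := (PySem.Int.ofChars? (chuSoGiamDan.flatMap PySem.Int.toChars)).getD 0
  let hieu := soLonNhat - soNhoNhat
  if hieu = soKyDieu then ("YES", soLonNhat, soNhoNhat) else ("NO", soLonNhat, soNhoNhat)

-- ===== PORT B =====
def check_alt (soKyDieu : Int) : String × Int × Int :=
  let count := (PySem.Int.toChars soKyDieu).foldl
    (fun (cnt : PySem.Dict Int Int) chu =>
      let d := pyDigit chu
      cnt.insert d (cnt.getD d 0 + 1)) PySem.Dict.empty
  let soNhoNhat := (PySem.Int.ofChars? ((PySem.List.pyRange 0 10 1).flatMap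
      (fun d => PySem.List.pyRepeat (PySem.Int.toChars d) (count.getD d 0)))).getD 0
  let soLonNhat := (PySem.Int.ofChars? ((PySem.List.pyRange 9 (-1) (-1)).flatMap
      (fun d => PySem.List.pyRepeat (PySem.Int.toChars d) (count.getD d 0)))).getD 0
  if soLonNhat - soNhoNhat = soKyDieu then ("YES", soLonNhat, soNhoNhat) else ("NO", soLonNhat, soNhoNhat)

-- ===== PRECONDITION & SPEC =====
-- Pre_ excludes negative inputs, on which Python A raises ValueError (int('-') on the sign character).
def Pre_check (soKyDieu : Int) : Prop := 0 ≤ soKyDieu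
instance (soKyDieu : Int) : Decidable (Pre_check soKyDieu) := by unfold Pre_check; infer_instance
def pvWitness_check : Int := 495

def Spec_check (soKyDieu : Int) (out : String × Int × Int) : Prop := out = check_alt soKyDieu
instance (soKyDieu : Int) (out : String × Int × Int) : Decidable (Spec_check soKyDieu out) := by unfold Spec_check; infer_instance

-- ===== CLAIM (what is proved, stated in full; the proofs are below) =====
def Claim_equal_check : Prop := ∀ (soKyDieu : Int), Dom_check soKyDieu → Pre_check soKyDieu → Spec_check soKyDieu (check soKyDieu)

-- ===== LEMMAS AND PROOFS =====

-- every digit value pyDigit produces from a character of str(n) lies in [0, 9]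
lemma pyDigit_digitChar (m : Nat) (h : m < 10) :
    0 ≤ pyDigit (Nat.digitChar m) ∧ pyDigit (Nat.digitChar m) ≤ 9 := by
  interval_cases m <;> decide

lemma toDigitsCore_bound (f : Nat) : ∀ (n : Nat) (acc : List Char),
    (∀ c ∈ acc, 0 ≤ pyDigit c ∧ pyDigit c ≤ 9) →
    ∀ c ∈ Nat.toDigitsCore 10 f n acc, 0 ≤ pyDigit c ∧ pyDigit c ≤ 9 := by
  induction f with
  | zero => intro n acc h; simpa [Nat.toDigitsCore] using h
  | succ f ih =>
    intro n acc h c hc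
    simp only [Nat.toDigitsCore] at hc
    split at hc
    · rcases List.mem_cons.mp hc with rfl | hmem
      · exact pyDigit_digitChar _ (Nat.mod_lt _ (by norm_num))
      · exact h _ hmem
    · refine ih _ _ ?_ _ hc
      intro c' hc'
      rcases List.mem_cons.mp hc' with rfl | hmem
      · exact pyDigit_digitChar _ (Nat.mod_lt _ (by norm_num))
      · exact h _ hmem

lemma toChars_bound (n : Int) :
    ∀ c ∈ PySem.Int.toChars n, 0 ≤ pyDigit c ∧ pyDigit c ≤ 9 := by
  intro c hc
  unfold PySem.Int.toChars at hc
  split at hc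
  · rcases List.mem_cons.mp hc with rfl | hmem
    · decide
    · exact toDigitsCore_bound _ _ _ (by simp) _ hmem
  · exact toDigitsCore_bound _ _ _ (by simp) _ hc

-- ascending / descending bucket concatenations
def upB (xs : List Int) : List Int :=
  (PySem.List.pyRange 0 10 1).flatMap (fun d => List.replicate (xs.count d) d)
def dnB (xs : List Int) : List Int :=
  (PySem.List.pyRange 9 (-1) (-1)).flatMap (fun d => List.replicate (xs.count d) d)

lemma pyRange_up : PySem.List.pyRange 0 10 1 = [0,1,2,3,4,5,6,7,8,9] := by decide
lemma pyRange_dn : PySem.List.pyRange 9 (-1) (-1) = (PySem.List.pyRange 0 10 1).reverse := by decide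

lemma upB_perm (xs : List Int) (h : ∀ d ∈ xs, 0 ≤ d ∧ d ≤ 9) : (upB xs).Perm xs := by
  rw [List.perm_iff_count]
  intro v
  simp only [upB, pyRange_up, List.flatMap_cons, List.flatMap_nil, List.count_append,
    List.count_replicate, List.append_nil]
  by_cases hv : 0 ≤ v ∧ v ≤ 9
  · obtain ⟨h1, h2⟩ := hv
    interval_cases v <;> simp
  · have hz : xs.count v = 0 := List.count_eq_zero.mpr (fun hm => by have := h v hm; omega)
    rw [hz]
    have e : ∀ d : Int, d ≠ v → (d == v) = false := fun d hd => beq_false_of_ne hd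
    rw [e 0 (by omega), e 1 (by omega), e 2 (by omega), e 3 (by omega), e 4 (by omega),
        e 5 (by omega), e 6 (by omega), e 7 (by omega), e 8 (by omega), e 9 (by omega)]
    simp

lemma dnB_perm (xs : List Int) (h : ∀ d ∈ xs, 0 ≤ d ∧ d ≤ 9) : (dnB xs).Perm xs := by
  refine List.Perm.trans ?_ (upB_perm xs h)
  rw [dnB, upB, pyRange_dn]
  exact List.Perm.flatMap_right _ (List.reverse_perm _)

lemma buckets_pairwise {R : Int → Int → Prop} (xs ds : List Int) (hrefl : ∀ d, R d d)
    (hd : ds.Pairwise R) : (ds.flatMap fun d => List.replicate (xs.count d) d).Pairwise R := by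
  rw [List.flatMap_def, List.pairwise_flatten]
  constructor
  · intro l hl
    obtain ⟨d, -, rfl⟩ := List.mem_map.mp hl
    exact List.pairwise_replicate.mpr (Or.inr (hrefl d))
  · rw [List.pairwise_map]
    refine hd.imp ?_
    intro a b hab x hx y hy
    rw [List.eq_of_mem_replicate hx, List.eq_of_mem_replicate hy]
    exact hab

lemma upB_pairwise (xs : List Int) : (upB xs).Pairwise (fun a b => a ≤ b) := by
  refine buckets_pairwise xs _ (fun d => le_refl d) ?_
  rw [pyRange_up]
  decide

lemma dnB_pairwise (xs : List Int) : (dnB xs).Pairwise (fun a b => b ≤ a) := by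
  refine buckets_pairwise xs _ (fun d => le_refl d) ?_
  rw [pyRange_dn, pyRange_up]
  decide

lemma sorted_asc (xs : List Int) (h : ∀ d ∈ xs, 0 ≤ d ∧ d ≤ 9) :
    PySem.List.sorted xs (fun x => x) false = upB xs :=
  PySem.List.sorted_id_eq_of_perm_of_pairwise _ _ (upB_perm xs h) (upB_pairwise xs)

lemma sorted_desc (xs : List Int) (h : ∀ d ∈ xs, 0 ≤ d ∧ d ≤ 9) :
    PySem.List.sorted xs (fun x => x) true = dnB xs := by
  refine PySem.List.eq_of_perm_of_pairwise_le_of_injective (fun a : Int => -a)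
    neg_injective ((PySem.List.sorted_perm _ _ _).trans (dnB_perm xs h).symm) ?_ ?_
  · exact (PySem.List.sorted_pairwise_rev xs (fun x => x)).imp (fun hab => by simp only []; omega)
  · exact (dnB_pairwise xs).imp (fun hab => by simp only []; omega)

-- joining str(d) over a bucket list
lemma flatMap_buckets (ds : List Int) (xs : List Int) :
    (ds.flatMap (fun d => List.replicate (xs.count d) d)).flatMap PySem.Int.toChars
      = ds.flatMap (fun d => PySem.List.pyRepeat (PySem.Int.toChars d) ((xs.count d : Nat) : Int)) := by
  rw [List.flatMap_assoc]
  simp [PySem.List.pyRepeat, List.flatMap_def, List.map_replicate]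

-- B's frequency dict is the counter of A's digit list
lemma count_dict (n : Int) (d : Int) :
    ((PySem.Int.toChars n).foldl
      (fun (cnt : PySem.Dict Int Int) chu => cnt.insert (pyDigit chu) (cnt.getD (pyDigit chu) 0 + 1))
      PySem.Dict.empty).getD d 0 = (((PySem.Int.toChars n).map pyDigit).count d : Int) := by
  have h := List.foldl_map (f := pyDigit)
    (g := fun (cnt : PySem.Dict Int Int) x => cnt.insert x (cnt.getD x 0 + 1))
    (l := PySem.Int.toChars n) (init := PySem.Dict.empty)
  rw [← h, PySem.Dict.foldl_insert_getD_add_one_eq_counter, PySem.Dict.getD_counter]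

theorem check_eq_alt (n : Int) : check n = check_alt n := by
  have hx : ∀ d ∈ (PySem.Int.toChars n).map pyDigit, 0 ≤ d ∧ d ≤ 9 := by
    intro d hd
    obtain ⟨c, hc, rfl⟩ := List.mem_map.mp hd
    exact toChars_bound n c hc
  unfold check check_alt
  simp only [count_dict n, sorted_asc _ hx, sorted_desc _ hx, upB, dnB,
    flatMap_buckets]

-- ===== VERDICT (by name: the statement is the Claim_ definition above) =====
theorem check_spec : Claim_equal_check := by
  intro n _ _
  unfold Spec_check
  exact check_eq_alt n
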